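-- pv_equiv track=rewrite | github.com/sskibin22/AI_Final_Project | NaiveBayes_Digit_Rec(Convolution).py | get_digit_totals
-- ===== SOURCE A (Python) =====
-- def get_digit_totals(labels_list, d_total):
--     count_0 = 0
--     count_1 = 0
--     count_2 = 0
--     count_3 = 0
--     count_4 = 0
--     count_5 = 0
--     count_6 = 0
--     count_7 = 0
--     count_8 = 0
--     count_9 = 0
--     for x in range(d_total):
--         if labels_list[x] == '0':
--             count_0 += 1
--         elif labels_list[x] == '1':
--             count_1 += 1
--         elif labels_list[x] == '2':
--             count_2 += 1
--         elif labels_list[x] == '3':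
--             count_3 += 1
--         elif labels_list[x] == '4':
--             count_4 += 1
--         elif labels_list[x] == '5':
--             count_5 += 1
--         elif labels_list[x] == '6':
--             count_6 += 1
--         elif labels_list[x] == '7':
--             count_7 += 1
--         elif labels_list[x] == '8':
--             count_8 += 1
--         elif labels_list[x] == '9':
--             count_9 += 1
--         else:
--             continue
--     return count_0, count_1, count_2, count_3, count_4, count_5, count_6, count_7, count_8, count_9
-- ===== SOURCE B (Python) =====
-- def get_digit_totals(labels_list, d_total):
--     return tuple(
--         sum(1 for i in range(d_total) if labels_list[i] == str(d))
--         for d in range(10)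
--     )
-- ===== Notes on version B (the rewrite author's own statement) =====
-- stated objective: simpler
-- what changed: Replaces the single pass with a 10-branch if/elif chain over ten named counters by ten independent counting passes (one sum per digit d in 0..9), assembled into the tuple directly.
import Mathlib
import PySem

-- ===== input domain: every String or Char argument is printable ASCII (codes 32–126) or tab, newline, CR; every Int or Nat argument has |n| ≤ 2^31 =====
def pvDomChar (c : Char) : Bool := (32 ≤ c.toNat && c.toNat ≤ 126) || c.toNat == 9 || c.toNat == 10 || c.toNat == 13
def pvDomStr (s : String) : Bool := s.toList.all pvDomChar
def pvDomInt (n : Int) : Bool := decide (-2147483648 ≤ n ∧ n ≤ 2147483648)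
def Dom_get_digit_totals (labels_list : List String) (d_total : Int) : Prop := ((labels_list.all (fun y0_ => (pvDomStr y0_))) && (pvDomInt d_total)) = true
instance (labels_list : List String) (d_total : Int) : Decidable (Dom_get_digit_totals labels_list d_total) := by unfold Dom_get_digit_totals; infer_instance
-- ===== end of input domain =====

-- B replaces A's single pass with a 10-branch if/elif chain over ten named counters
-- by ten independent per-digit counting passes (simpler decomposition, same asymptotic cost).


-- ===== PORT A =====
-- literal port of A: one pass over range(d_total), 10-branch if/elif chain over ten counters
def pvStepA (labels_list : List String)
    (c : Int × Int × Int × Int × Int × Int × Int × Int × Int × Int) (x : Int) :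
    Int × Int × Int × Int × Int × Int × Int × Int × Int × Int :=
  match c with
  | (c0, c1, c2, c3, c4, c5, c6, c7, c8, c9) =>
    let v := (PySem.List.pyGet? labels_list x).getD ""   -- Pre_ keeps every index in range, so getD's default is never read
    if v = "0" then (c0 + 1, c1, c2, c3, c4, c5, c6, c7, c8, c9)
    else if v = "1" then (c0, c1 + 1, c2, c3, c4, c5, c6, c7, c8, c9)
    else if v = "2" then (c0, c1, c2 + 1, c3, c4, c5, c6, c7, c8, c9)
    else if v = "3" then (c0, c1, c2, c3 + 1, c4, c5, c6, c7, c8, c9)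
    else if v = "4" then (c0, c1, c2, c3, c4 + 1, c5, c6, c7, c8, c9)
    else if v = "5" then (c0, c1, c2, c3, c4, c5 + 1, c6, c7, c8, c9)
    else if v = "6" then (c0, c1, c2, c3, c4, c5, c6 + 1, c7, c8, c9)
    else if v = "7" then (c0, c1, c2, c3, c4, c5, c6, c7 + 1, c8, c9)
    else if v = "8" then (c0, c1, c2, c3, c4, c5, c6, c7, c8 + 1, c9)
    else if v = "9" then (c0, c1, c2, c3, c4, c5, c6, c7, c8, c9 + 1)
    else (c0, c1, c2, c3, c4, c5, c6, c7, c8, c9)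

def get_digit_totals (labels_list : List String) (d_total : Int) : Int × Int × Int × Int × Int × Int × Int × Int × Int × Int :=
  (PySem.List.pyRange 0 d_total 1).foldl (pvStepA labels_list) (0, 0, 0, 0, 0, 0, 0, 0, 0, 0)

-- ===== PORT B =====
-- sum(1 for i in range(d_total) if labels_list[i] == str(d))
def pvDigitCount (labels_list : List String) (d_total : Int) (d : Int) : Int :=
  ((PySem.List.pyRange 0 d_total 1).map
    (fun i => if (PySem.List.pyGet? labels_list i).getD "" = PySem.Int.toStr d then (1 : Int) else 0)).sum

def get_digit_totals_alt (labels_list : List String) (d_total : Int) : Int × Int × Int × Int × Int × Int × Int × Int × Int × Int :=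
  (pvDigitCount labels_list d_total 0, pvDigitCount labels_list d_total 1,
   pvDigitCount labels_list d_total 2, pvDigitCount labels_list d_total 3,
   pvDigitCount labels_list d_total 4, pvDigitCount labels_list d_total 5,
   pvDigitCount labels_list d_total 6, pvDigitCount labels_list d_total 7,
   pvDigitCount labels_list d_total 8, pvDigitCount labels_list d_total 9)

-- ===== PRECONDITION & SPEC =====
-- Python A raises IndexError when d_total > len(labels_list); those inputs are excluded.
def Pre_get_digit_totals (labels_list : List String) (d_total : Int) : Prop :=
  d_total ≤ (labels_list.length : Int)
instance (labels_list : List String) (d_total : Int) : Decidable (Pre_get_digit_totals labels_list d_total) := by unfold Pre_get_digit_totals; infer_instance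

def pvWitness_get_digit_totals : List String × Int := (["1", "x", "1", "9"], 4)

def Spec_get_digit_totals (labels_list : List String) (d_total : Int) (out : Int × Int × Int × Int × Int × Int × Int × Int × Int × Int) : Prop := out = get_digit_totals_alt labels_list d_total
instance (labels_list : List String) (d_total : Int) (out : Int × Int × Int × Int × Int × Int × Int × Int × Int × Int) : Decidable (Spec_get_digit_totals labels_list d_total out) := by
  unfold Spec_get_digit_totals
  letI d5 : DecidableEq (Int × Int × Int × Int × Int) := inferInstance
  letI d6 : DecidableEq (Int × Int × Int × Int × Int × Int) := instDecidableEqProd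
  letI d7 : DecidableEq (Int × Int × Int × Int × Int × Int × Int) := instDecidableEqProd
  letI d8 : DecidableEq (Int × Int × Int × Int × Int × Int × Int × Int) := instDecidableEqProd
  letI d9 : DecidableEq (Int × Int × Int × Int × Int × Int × Int × Int × Int) := instDecidableEqProd
  letI d10 : DecidableEq (Int × Int × Int × Int × Int × Int × Int × Int × Int × Int) := instDecidableEqProd
  exact d10 _ _

-- ===== CLAIM (what is proved, stated in full; the proofs are below) =====
def Claim_equal_get_digit_totals : Prop := ∀ (labels_list : List String) (d_total : Int), Dom_get_digit_totals labels_list d_total → Pre_get_digit_totals labels_list d_total → Spec_get_digit_totals labels_list d_total (get_digit_totals labels_list d_total)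

-- ===== LEMMAS AND PROOFS =====

-- one A-step adds, to each counter, the 0/1 indicator B sums per digit
theorem pvStepA_eq (labels_list : List String) (x c0 c1 c2 c3 c4 c5 c6 c7 c8 c9 : Int) :
    pvStepA labels_list (c0, c1, c2, c3, c4, c5, c6, c7, c8, c9) x
    = (c0 + (if (PySem.List.pyGet? labels_list x).getD "" = "0" then (1 : Int) else 0), c1 + (if (PySem.List.pyGet? labels_list x).getD "" = "1" then (1 : Int) else 0), c2 + (if (PySem.List.pyGet? labels_list x).getD "" = "2" then (1 : Int) else 0), c3 + (if (PySem.List.pyGet? labels_list x).getD "" = "3" then (1 : Int) else 0), c4 + (if (PySem.List.pyGet? labels_list x).getD "" = "4" then (1 : Int) else 0), c5 + (if (PySem.List.pyGet? labels_list x).getD "" = "5" then (1 : Int) else 0), c6 + (if (PySem.List.pyGet? labels_list x).getD "" = "6" then (1 : Int) else 0), c7 + (if (PySem.List.pyGet? labels_list x).getD "" = "7" then (1 : Int) else 0), c8 + (if (PySem.List.pyGet? labels_list x).getD "" = "8" then (1 : Int) else 0), c9 + (if (PySem.List.pyGet? labels_list x).getD "" = "9" then (1 : Int) else 0)) := by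
  simp only [pvStepA]
  generalize (PySem.List.pyGet? labels_list x).getD "" = v
  by_cases h0 : v = "0"
  · subst h0; simp
  by_cases h1 : v = "1"
  · subst h1; simp
  by_cases h2 : v = "2"
  · subst h2; simp
  by_cases h3 : v = "3"
  · subst h3; simp
  by_cases h4 : v = "4"
  · subst h4; simp
  by_cases h5 : v = "5"
  · subst h5; simp
  by_cases h6 : v = "6"
  · subst h6; simp
  by_cases h7 : v = "7"
  · subst h7; simp
  by_cases h8 : v = "8"
  · subst h8; simp
  by_cases h9 : v = "9"
  · subst h9; simp
  simp [h0, h1, h2, h3, h4, h5, h6, h7, h8, h9]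

-- A's fold over any index list, started from arbitrary counters, is the start plus
-- B's per-digit 0/1 sums over the same index list.
theorem pv_loop_eq (labels_list : List String) (l : List Int)
    (c0 c1 c2 c3 c4 c5 c6 c7 c8 c9 : Int) :
    l.foldl (pvStepA labels_list) (c0, c1, c2, c3, c4, c5, c6, c7, c8, c9)
    = (c0 + (l.map (fun i => if (PySem.List.pyGet? labels_list i).getD "" = "0" then (1 : Int) else 0)).sum,
       c1 + (l.map (fun i => if (PySem.List.pyGet? labels_list i).getD "" = "1" then (1 : Int) else 0)).sum,
       c2 + (l.map (fun i => if (PySem.List.pyGet? labels_list i).getD "" = "2" then (1 : Int) else 0)).sum,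
       c3 + (l.map (fun i => if (PySem.List.pyGet? labels_list i).getD "" = "3" then (1 : Int) else 0)).sum,
       c4 + (l.map (fun i => if (PySem.List.pyGet? labels_list i).getD "" = "4" then (1 : Int) else 0)).sum,
       c5 + (l.map (fun i => if (PySem.List.pyGet? labels_list i).getD "" = "5" then (1 : Int) else 0)).sum,
       c6 + (l.map (fun i => if (PySem.List.pyGet? labels_list i).getD "" = "6" then (1 : Int) else 0)).sum,
       c7 + (l.map (fun i => if (PySem.List.pyGet? labels_list i).getD "" = "7" then (1 : Int) else 0)).sum,
       c8 + (l.map (fun i => if (PySem.List.pyGet? labels_list i).getD "" = "8" then (1 : Int) else 0)).sum,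
       c9 + (l.map (fun i => if (PySem.List.pyGet? labels_list i).getD "" = "9" then (1 : Int) else 0)).sum) := by
  induction l generalizing c0 c1 c2 c3 c4 c5 c6 c7 c8 c9 with
  | nil => simp
  | cons a t ih =>
    simp only [List.foldl_cons, List.map_cons, List.sum_cons, pvStepA_eq, ih]
    simp [add_assoc]

theorem get_digit_totals_spec : Claim_equal_get_digit_totals := by
  unfold Claim_equal_get_digit_totals
  intro labels_list d_total _ _
  unfold Spec_get_digit_totals get_digit_totals get_digit_totals_alt pvDigitCount
  rw [pv_loop_eq]
  norm_num [show PySem.Int.toStr 0 = "0" from rfl, show PySem.Int.toStr 1 = "1" from rfl,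
    show PySem.Int.toStr 2 = "2" from rfl, show PySem.Int.toStr 3 = "3" from rfl,
    show PySem.Int.toStr 4 = "4" from rfl, show PySem.Int.toStr 5 = "5" from rfl,
    show PySem.Int.toStr 6 = "6" from rfl, show PySem.Int.toStr 7 = "7" from rfl,
    show PySem.Int.toStr 8 = "8" from rfl, show PySem.Int.toStr 9 = "9" from rfl]
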